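-- pv_equiv track=rewrite | github.com/JamesPriest/AOC | 2023/D18/soln.py | parse_corners
-- ===== SOURCE A (Python) =====
-- def parse_corners(instructions):
--     corners = []
--     for length, direction in instructions:
--         if corners:
--             x, y = corners[-1]
--         else:
--             x, y = 0, 0
--         if direction == 'R':
--             x += 0 * length
--             y += 1 * length
--         elif direction == 'L':
--             x += 0 * length
--             y += -1 * length
--         elif direction == 'U':
--             x += -1 * length
--             y += 0 * length
--         elif direction == 'D':
--             x += 1 * length
--             y += 0 * length
--         corners.append((x, y))
--     return corners
-- ===== SOURCE B (Python) =====
-- def parse_corners(instructions):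
--     def _delta(length, direction):
--         if direction == 'R':
--             return (0, length)
--         if direction == 'L':
--             return (0, -length)
--         if direction == 'U':
--             return (-length, 0)
--         if direction == 'D':
--             return (length, 0)
--         return (0, 0)
--
--     def _solve(instrs):
--         # divide and conquer: corners of the two halves, second half shifted
--         # by the last corner of the first half
--         n = len(instrs)
--         if n == 0:
--             return []
--         if n == 1:
--             return [_delta(*instrs[0])]
--         mid = n // 2
--         left = _solve(instrs[:mid])
--         right = _solve(instrs[mid:])
--         ox, oy = left[-1]
--         return left + [(ox + x, oy + y) for (x, y) in right]
--
--     return _solve(instructions)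
-- ===== Notes on version B (the rewrite author's own statement) =====
-- stated objective: alternative
-- what changed: Replaces A's left-to-right loop that re-reads corners[-1] by a divide-and-conquer: split the instruction list at the midpoint, recursively compute the corner lists of both halves, and translate the second half's corners by the last corner of the first half (correct because corners are prefix sums of per-instruction deltas, and prefix sums compose under a translation offset).
import Mathlib
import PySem

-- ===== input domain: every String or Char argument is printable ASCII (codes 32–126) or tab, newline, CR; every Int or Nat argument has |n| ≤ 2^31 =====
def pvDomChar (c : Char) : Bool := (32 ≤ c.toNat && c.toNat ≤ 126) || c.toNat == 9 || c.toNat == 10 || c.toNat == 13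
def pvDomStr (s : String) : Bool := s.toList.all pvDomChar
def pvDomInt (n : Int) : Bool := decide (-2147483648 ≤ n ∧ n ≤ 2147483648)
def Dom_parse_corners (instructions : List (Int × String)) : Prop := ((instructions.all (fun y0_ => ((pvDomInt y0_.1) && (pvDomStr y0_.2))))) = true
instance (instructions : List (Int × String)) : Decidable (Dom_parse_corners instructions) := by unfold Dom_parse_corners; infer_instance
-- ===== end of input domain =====

-- B replaces A's left-to-right loop by a divide-and-conquer on the midpoint
-- (recursive halves, the second half's corners translated by the first half's
-- last corner): a different algorithm of similar cost (objective: alternative).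

-- ===== PORT A =====
-- the loop body of A: read corners[-1] (or (0,0)), branch on direction, append
def pvLoopA : List (Int × Int) → List (Int × String) → List (Int × Int)
  | corners, [] => corners
  | corners, (length, direction) :: rest =>
    let p := match corners.getLast? with
      | some p => p
      | none => ((0 : Int), (0 : Int))
    let x := p.1
    let y := p.2
    let q :=
      if direction == "R" then (x + 0 * length, y + 1 * length)
      else if direction == "L" then (x + 0 * length, y + (-1) * length)
      else if direction == "U" then (x + (-1) * length, y + 0 * length)
      else if direction == "D" then (x + 1 * length, y + 0 * length)
      else (x, y)
    pvLoopA (corners ++ [q]) rest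

def parse_corners (instructions : List (Int × String)) : List (Int × Int) :=
  pvLoopA [] instructions

-- ===== PORT B =====
-- _delta of Source B
def pvDelta (length : Int) (direction : String) : Int × Int :=
  if direction == "R" then (0, length)
  else if direction == "L" then (0, -length)
  else if direction == "U" then (-length, 0)
  else if direction == "D" then (length, 0)
  else (0, 0)

-- _solve of Source B: divide and conquer at mid = n // 2; left is nonempty
-- (mid ≥ 1), so left[-1] is ported as getLast?.getD
def pvSolve (instrs : List (Int × String)) : List (Int × Int) :=
  match instrs with
  | [] => []
  | [li] => [pvDelta li.1 li.2]
  | a :: b :: rest =>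
    let n := (a :: b :: rest).length
    let mid := n / 2
    let left := pvSolve ((a :: b :: rest).take mid)
    let right := pvSolve ((a :: b :: rest).drop mid)
    let o := left.getLast?.getD ((0 : Int), (0 : Int))
    left ++ right.map (fun q => (o.1 + q.1, o.2 + q.2))
  termination_by instrs.length
  decreasing_by
  · simp; omega
  · simp; omega

def parse_corners_alt (instructions : List (Int × String)) : List (Int × Int) :=
  pvSolve instructions

-- ===== PRECONDITION & SPEC =====
def Spec_parse_corners (instructions : List (Int × String)) (out : List (Int × Int)) : Prop := out = parse_corners_alt instructions
instance (instructions : List (Int × String)) (out : List (Int × Int)) : Decidable (Spec_parse_corners instructions out) := by unfold Spec_parse_corners; infer_instance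

-- ===== CLAIM (what is proved, stated in full; the proofs are below) =====
def Claim_equal_parse_corners : Prop := ∀ (instructions : List (Int × String)), Dom_parse_corners instructions → Spec_parse_corners instructions (parse_corners instructions)

-- ===== LEMMAS AND PROOFS =====

-- proof-only reference form: the prefix-sum scan starting at p
def pvScan (p : Int × Int) : List (Int × Int) → List (Int × Int)
  | [] => []
  | d :: ds => (p.1 + d.1, p.2 + d.2) :: pvScan (p.1 + d.1, p.2 + d.2) ds

def pvDeltas (instrs : List (Int × String)) : List (Int × Int) :=
  instrs.map (fun li => pvDelta li.1 li.2)

theorem pvScan_shift (ds : List (Int × Int)) (p : Int × Int) :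
    pvScan p ds = (pvScan (0, 0) ds).map (fun q => (p.1 + q.1, p.2 + q.2)) := by
  induction ds generalizing p with
  | nil => rfl
  | cons d ds ih =>
    simp only [pvScan, List.map_cons]
    rw [ih, ih (0 + d.1, 0 + d.2), List.map_map]
    congr 1
    · simp
    · congr 1
      funext q
      simp only [Function.comp_apply, Prod.mk.injEq]
      constructor <;> ring

theorem pvScan_append (ds1 ds2 : List (Int × Int)) (p : Int × Int) :
    pvScan p (ds1 ++ ds2) =
      pvScan p ds1 ++ pvScan ((pvScan p ds1).getLast?.getD p) ds2 := by
  induction ds1 generalizing p with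
  | nil => simp [pvScan]
  | cons d ds1 ih =>
    simp only [List.cons_append, pvScan]
    rw [ih]
    congr 2
    rw [List.getLast?_cons]
    cases h : (pvScan (p.1 + d.1, p.2 + d.2) ds1).getLast? with
    | none => simp
    | some q => simp

theorem pvSolve_eq_scan (instrs : List (Int × String)) :
    pvSolve instrs = pvScan (0, 0) (pvDeltas instrs) := by
  induction instrs using pvSolve.induct with
  | case1 => rw [pvSolve]; rfl
  | case2 li =>
    rw [pvSolve]; simp [pvDeltas, pvScan]
  | case3 a b rest _n _mid ih1 ih2 =>
    rw [pvSolve]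
    rw [ih1, ih2]
    have hsplit : pvDeltas (a :: b :: rest) =
        pvDeltas ((a :: b :: rest).take ((a :: b :: rest).length / 2)) ++
        pvDeltas ((a :: b :: rest).drop ((a :: b :: rest).length / 2)) := by
      simp [pvDeltas]
    rw [hsplit, pvScan_append]
    congr 1
    have hne : pvDeltas ((a :: b :: rest).take ((a :: b :: rest).length / 2)) ≠ [] := by
      simp [pvDeltas]
    obtain ⟨d, ds, hds⟩ := List.exists_cons_of_ne_nil hne
    rw [hds]
    rw [pvScan_shift _ ((pvScan (0,0) (d :: ds)).getLast?.getD (0, 0))]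

theorem getD_match (o : Option (Int × Int)) :
    (match o with | some p => p | none => ((0 : Int), (0 : Int))) = o.getD (0, 0) := by
  cases o <;> rfl

theorem pvLoopA_eq (instrs : List (Int × String)) (corners : List (Int × Int)) :
    pvLoopA corners instrs =
      corners ++ pvScan (corners.getLast?.getD (0, 0)) (pvDeltas instrs) := by
  induction instrs generalizing corners with
  | nil => simp [pvLoopA, pvScan, pvDeltas]
  | cons li rest ih =>
    obtain ⟨length, direction⟩ := li
    rw [pvLoopA, ih]
    simp only [pvDeltas, List.map_cons]
    rw [pvScan]
    have hstep : ∀ x y : Int,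
        (if direction == "R" then (x + 0 * length, y + 1 * length)
         else if direction == "L" then (x + 0 * length, y + (-1) * length)
         else if direction == "U" then (x + (-1) * length, y + 0 * length)
         else if direction == "D" then (x + 1 * length, y + 0 * length)
         else (x, y)) =
        (x + (pvDelta length direction).1, y + (pvDelta length direction).2) := by
      intro x y
      unfold pvDelta
      split_ifs <;> simp
    simp only [hstep, getD_match]
    simp only [List.append_assoc, List.singleton_append]
    rw [List.getLast?_append]
    simp

-- ===== VERDICT (by name: the statement is the Claim_ definition above) =====
theorem parse_corners_spec : Claim_equal_parse_corners := by
  intro instructions _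
  unfold Spec_parse_corners parse_corners parse_corners_alt
  rw [pvLoopA_eq, pvSolve_eq_scan]
  rfl
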